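-- pv_equiv track=rewrite | github.com/klknet/geeks4geeks | datastructure/array/rearrange_arr.py | rearrange2
-- ===== SOURCE A (Python) =====
-- def rearrange2(arr):
--     unique = set(arr)
--     for i in range(len(arr)):
--         if i in unique:
--             arr[i] = i
--         else:
--             arr[i] = -1
--     return arr
-- ===== SOURCE B (Python) =====
-- def rearrange2(arr):
--     n = len(arr)
--     vals = sorted(set(arr))
--     res = []
--     k = 0
--     for i in range(n):
--         while k < len(vals) and vals[k] < i:
--             k += 1
--         if k < len(vals) and vals[k] == i:
--             res.append(i)
--         else:
--             res.append(-1)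
--     arr[:] = res
--     return arr
-- ===== Notes on version B (the rewrite author's own statement) =====
-- stated objective: alternative
-- what changed: Replaces A's hash-set membership test per index with a sort-then-merge: sort the distinct values once and walk them with a second pointer alongside the index sweep, deciding each cell by comparison with the current sorted value instead of a set lookup.
import Mathlib
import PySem

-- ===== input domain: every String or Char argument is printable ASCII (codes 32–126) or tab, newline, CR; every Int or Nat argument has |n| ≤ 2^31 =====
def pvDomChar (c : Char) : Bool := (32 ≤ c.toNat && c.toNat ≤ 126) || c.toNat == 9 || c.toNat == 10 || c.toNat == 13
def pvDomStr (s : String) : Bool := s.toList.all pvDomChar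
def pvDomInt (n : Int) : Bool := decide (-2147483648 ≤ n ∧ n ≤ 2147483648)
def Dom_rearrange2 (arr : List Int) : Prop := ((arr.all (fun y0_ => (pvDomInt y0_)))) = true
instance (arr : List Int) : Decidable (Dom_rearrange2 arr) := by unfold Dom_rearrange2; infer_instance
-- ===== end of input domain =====

-- B replaces A's per-index hash-set membership gather with sort-then-merge: the distinct values are
-- sorted once and a second pointer walks them alongside the index sweep, deciding each cell by
-- comparison with the current sorted value. Both Pythons mutate arr in place and return it; the
-- equivalence proved here is about the return value (B performs the same final in-place
-- assignment via arr[:] = res).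

-- ===== PORT A =====
-- unique = set(arr) is inlined; each loop step tests membership and writes arr[i] in place
def rearrange2 (arr : List Int) : List Int :=
  (PySem.List.pyRange 0 arr.length 1).foldl
    (fun a i =>
      if PySem.Set.contains (PySem.Set.ofList arr) i then PySem.List.pySetD a i i
      else PySem.List.pySetD a i (-1)) arr

-- ===== PORT B =====
-- while k < len(vals) and vals[k] < i: k += 1
def skipLt (vals : List Int) (i : Int) (k : Nat) : Nat :=
  if h : k < vals.length ∧ vals.getD k 0 < i then skipLt vals i (k + 1) else k
termination_by vals.length - k
decreasing_by omega

-- vals = sorted(set(arr)); the loop carries (res, k) and appends i or -1 after advancing k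
def rearrange2_alt (arr : List Int) : List Int :=
  (let vals := PySem.List.sorted (PySem.Set.ofList arr) (fun x => x) false
   (PySem.List.pyRange 0 (arr.length : Int) 1).foldl
      (fun (st : List Int × Nat) i =>
        let k := skipLt vals i st.2
        if k < vals.length ∧ vals.getD k 0 = i then (st.1 ++ [i], k) else (st.1 ++ [-1], k))
      ([], 0)).1

-- ===== PRECONDITION & SPEC =====
def Spec_rearrange2 (arr : List Int) (out : List Int) : Prop := out = rearrange2_alt arr
instance (arr : List Int) (out : List Int) : Decidable (Spec_rearrange2 arr out) := by unfold Spec_rearrange2; infer_instance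

-- ===== CLAIM (what is proved, stated in full; the proofs are below) =====
def Claim_equal_rearrange2 : Prop := ∀ (arr : List Int), Dom_rearrange2 arr → Spec_rearrange2 arr (rearrange2 arr)

-- ===== LEMMAS AND PROOFS =====

-- setting one cell of a range-map stays a range-map
lemma set_map_range {n : Nat} (g : Nat → Int) (m : Nat) (x : Int) :
    ((List.range n).map g).set m x
      = (List.range n).map (fun (j : Nat) => if j = m then x else g j) := by
  apply List.ext_getElem
  · simp
  · intro i h1 h2
    simp only [List.getElem_set, List.getElem_map, List.getElem_range]
    by_cases h : m = i
    · simp [h]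
    · rw [if_neg h, if_neg (fun he => h he.symm)]

lemma map_range_congr {n : Nat} (g g' : Nat → Int) (h : ∀ j < n, g j = g' j) :
    (List.range n).map g = (List.range n).map g' := by
  apply List.map_congr_left
  intro j hj
  exact h j (List.mem_range.mp hj)

lemma self_eq_map_range (a : List Int) :
    a = (List.range a.length).map (fun (j : Nat) => a.getD j 0) := by
  apply List.ext_getElem
  · simp
  · intro i h1 h2
    simp [List.getD_eq_getElem?_getD, List.getElem?_eq_getElem h1]

-- invariant of A's gather loop (over the first m indices, from an arbitrary buffer a)
lemma afold (arr : List Int) : ∀ (m : Nat), m ≤ arr.length → ∀ (a : List Int), a.length = arr.length →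
    (PySem.List.pyRange 0 (m : Int) 1).foldl
        (fun a i =>
          if PySem.Set.contains (PySem.Set.ofList arr) i then PySem.List.pySetD a i i
          else PySem.List.pySetD a i (-1)) a
      = (List.range arr.length).map
          (fun (j : Nat) =>
            if j < m then (if (j : Int) ∈ arr then (j : Int) else -1) else a.getD j 0) := by
  intro m
  induction m with
  | zero =>
    intro _ a ha
    rw [PySem.List.pyRange_one_eq_nil (by omega), ← ha]
    simp only [List.foldl_nil, Nat.not_lt_zero, if_false]
    exact self_eq_map_range a
  | succ m ih =>
    intro hm a ha
    have h1 : ((m + 1 : Nat) : Int) = (m : Int) + 1 := by push_cast; ring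
    rw [h1, PySem.List.pyRange_one_succ_right (by omega), List.foldl_append,
        ih (by omega) a ha]
    simp only [List.foldl_cons, List.foldl_nil]
    by_cases h : ((m : Nat) : Int) ∈ arr
    · rw [if_pos (by simp [PySem.Set.mem_ofList, h]),
          PySem.List.pySetD_natCast, set_map_range]
      apply map_range_congr
      intro j hj
      by_cases he : j = m
      · subst he; simp [h]
      · have h2 : (j < m + 1) ↔ j < m := by omega
        simp [he, h2]
    · rw [if_neg (by simp [PySem.Set.mem_ofList, h]),
          PySem.List.pySetD_natCast, set_map_range]
      apply map_range_congr
      intro j hj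
      by_cases he : j = m
      · subst he; simp [h]
      · have h2 : (j < m + 1) ↔ j < m := by omega
        simp [he, h2]

lemma rearrange2_eq (arr : List Int) :
    rearrange2 arr
      = (List.range arr.length).map (fun (j : Nat) => if (j : Int) ∈ arr then (j : Int) else -1) := by
  unfold rearrange2
  rw [afold arr arr.length le_rfl arr rfl]
  exact map_range_congr _ _ (fun j hj => by simp [hj])

-- ---- B-side lemmas: the merge pointer ----

-- the while loop adds the length of the leading run of values < i after position k
lemma skipLt_eq (vals : List Int) (i : Int) (k : Nat) :
    skipLt vals i k = k + ((vals.drop k).takeWhile (fun v => decide (v < i))).length := by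
  fun_induction skipLt vals i k with
  | case1 k h ih =>
    rw [ih, List.drop_eq_getElem_cons h.1, List.takeWhile_cons]
    have hd : vals.getD k 0 = vals[k] := List.getD_eq_getElem vals 0 h.1
    rw [hd] at h
    simp only [h.2, decide_true, if_true, List.length_cons]
    omega
  | case2 k h =>
    by_cases hk : k < vals.length
    · have hd : vals.getD k 0 = vals[k] := List.getD_eq_getElem vals 0 hk
      have hni : ¬ vals[k] < i := by rw [hd] at h; tauto
      rw [List.drop_eq_getElem_cons hk, List.takeWhile_cons]
      simp [hni]
    · rw [List.drop_eq_nil_of_le (by omega)]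
      simp

-- takeWhile through a prefix all of whose elements pass
lemma takeWhile_append_all (p : Int → Bool) (u v : List Int) (hu : ∀ x ∈ u, p x = true) :
    (u ++ v).takeWhile p = u ++ v.takeWhile p := by
  induction u with
  | nil => simp
  | cons a u ih =>
    simp only [List.cons_append, List.takeWhile_cons, hu a (by simp), if_true]
    rw [ih (fun x hx => hu x (by simp [hx]))]

lemma takeWhile_dropWhile_nil (p : Int → Bool) (s : List Int) :
    (s.dropWhile p).takeWhile p = [] := by
  induction s with
  | nil => simp
  | cons a s ih =>
    by_cases hp : p a
    · simpa [List.dropWhile_cons, hp] using ih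
    · simp [hp]

-- a weaker test's prefix extends the stronger one's
lemma takeWhile_extend (p q : Int → Bool) (hpq : ∀ x, p x = true → q x = true) (s : List Int) :
    s.takeWhile q = s.takeWhile p ++ (s.dropWhile p).takeWhile q := by
  induction s with
  | nil => simp
  | cons a s ih =>
    by_cases hp : p a
    · simp only [List.takeWhile_cons, List.dropWhile_cons, hp, hpq a hp, if_true, List.cons_append]
      rw [ih]
    · simp [List.takeWhile_cons, hp]

lemma K_mono (s : List Int) (i i' : Int) (h : i ≤ i') :
    (s.takeWhile (fun v => decide (v < i))).length ≤ (s.takeWhile (fun v => decide (v < i'))).length := by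
  rw [takeWhile_extend (fun v => decide (v < i)) (fun v => decide (v < i'))
      (fun x hx => by simp at hx ⊢; omega) s]
  simp

-- starting anywhere inside the passing prefix, the advance lands at its end
lemma skip_reach (p : Int → Bool) (s : List Int) (k : Nat) (hk : k ≤ (s.takeWhile p).length) :
    k + ((s.drop k).takeWhile p).length = (s.takeWhile p).length := by
  have hsplit : s.drop k = (s.takeWhile p).drop k ++ s.dropWhile p := by
    conv_lhs => rw [← List.takeWhile_append_dropWhile (p := p) (l := s)]
    rw [List.drop_append_of_le_length hk]
  rw [hsplit, takeWhile_append_all p _ _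
      (fun x hx => List.mem_takeWhile_imp (List.mem_of_mem_drop hx)),
      takeWhile_dropWhile_nil]
  simp only [List.append_nil, List.length_drop]
  omega

-- the head of the dropWhile part fails the test
lemma dropWhile_head_not (p : Int → Bool) (s : List Int) (a : Int) (t : List Int)
    (h : s.dropWhile p = a :: t) : p a = false := by
  induction s with
  | nil => simp at h
  | cons b s ih =>
    by_cases hp : p b
    · rw [List.dropWhile_cons, if_pos hp] at h; exact ih h
    · rw [List.dropWhile_cons, if_neg hp] at h
      cases h; simpa using hp

-- for a strictly increasing list, the pointer test decides membership
lemma mem_iff_at_K (s : List Int) (hs : s.Pairwise (· < ·)) (i : Int) :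
    ((s.takeWhile (fun v => decide (v < i))).length < s.length
      ∧ s.getD (s.takeWhile (fun v => decide (v < i))).length 0 = i) ↔ i ∈ s := by
  set p : Int → Bool := fun v => decide (v < i) with hp
  obtain ⟨t, d, hst, htw, hdw⟩ : ∃ t d, s = t ++ d ∧ t = s.takeWhile p ∧ d = s.dropWhile p :=
    ⟨_, _, (List.takeWhile_append_dropWhile).symm, rfl, rfl⟩
  have htlt : ∀ x ∈ t, x < i := fun x hx => by
    have := List.mem_takeWhile_imp (htw ▸ hx)
    simpa [hp] using this
  have hgd : (t ++ d).getD t.length 0 = d.getD 0 0 := by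
    rw [List.getD_eq_getElem?_getD, List.getElem?_append_right (le_refl _), Nat.sub_self,
        ← List.getD_eq_getElem?_getD]
  rw [← htw, hst]
  constructor
  · rintro ⟨hK, hg⟩
    rw [hgd] at hg
    cases hd : d with
    | nil => rw [hd] at hK; simp at hK
    | cons a t' =>
      rw [hd] at hg
      simp only [List.getD_cons_zero] at hg
      exact List.mem_append_right _ (by rw [← hg]; simp)
  · intro hm
    have hmd : i ∈ d := by
      rcases List.mem_append.mp hm with h | h
      · have := htlt i h; omega
      · exact h
    cases hd : d with
    | nil => rw [hd] at hmd; simp at hmd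
    | cons a t' =>
      rw [hd] at hmd
      have ha : p a = false := dropWhile_head_not p s a t' (by rw [← hdw, hd])
      have hia : i ≤ a := by simp [hp] at ha; omega
      have hai : i = a := by
        rcases List.mem_cons.mp hmd with h | h
        · exact h
        · have hpw : (t ++ d).Pairwise (· < ·) := hst ▸ hs
          have hdp : d.Pairwise (· < ·) := (List.pairwise_append.mp hpw).2.1
          rw [hd] at hdp
          have := (List.pairwise_cons.mp hdp).1 i h
          omega
      refine ⟨?_, ?_⟩
      · simp
      · rw [hd] at hgd; rw [hgd]; simp [hai]

-- invariant of B's merge loop: result so far, and the pointer never past the current prefix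
lemma bfold (s : List Int) (hs : s.Pairwise (· < ·)) (m : Nat) :
    ((PySem.List.pyRange 0 (m : Int) 1).foldl
        (fun (st : List Int × Nat) i =>
          let k := skipLt s i st.2
          if k < s.length ∧ s.getD k 0 = i then (st.1 ++ [i], k) else (st.1 ++ [-1], k))
        ([], 0)).1
      = (List.range m).map (fun (j : Nat) => if (j : Int) ∈ s then (j : Int) else -1)
    ∧ ((PySem.List.pyRange 0 (m : Int) 1).foldl
        (fun (st : List Int × Nat) i =>
          let k := skipLt s i st.2
          if k < s.length ∧ s.getD k 0 = i then (st.1 ++ [i], k) else (st.1 ++ [-1], k))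
        ([], 0)).2
      ≤ (s.takeWhile (fun v => decide (v < (m : Int)))).length := by
  induction m with
  | zero =>
    rw [PySem.List.pyRange_one_eq_nil (by omega)]
    simp
  | succ m ih =>
    have h1 : ((m + 1 : Nat) : Int) = (m : Int) + 1 := by push_cast; ring
    rw [h1, PySem.List.pyRange_one_succ_right (by omega), List.foldl_append]
    obtain ⟨ih1, ih2⟩ := ih
    set st := (PySem.List.pyRange 0 (m : Int) 1).foldl
        (fun (st : List Int × Nat) i =>
          let k := skipLt s i st.2
          if k < s.length ∧ s.getD k 0 = i then (st.1 ++ [i], k) else (st.1 ++ [-1], k))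
        ([], 0) with hst
    have hkK : skipLt s (m : Int) st.2 = (s.takeWhile (fun v => decide (v < (m : Int)))).length := by
      rw [skipLt_eq]
      exact skip_reach _ s st.2 ih2
    have hmemiff := mem_iff_at_K s hs (m : Int)
    have hKm1 : (s.takeWhile (fun v => decide (v < (m : Int)))).length
        ≤ (s.takeWhile (fun v => decide (v < (m : Int) + 1))).length :=
      K_mono s _ _ (by omega)
    simp only [List.foldl_cons, List.foldl_nil]
    by_cases hmem : ((m : Nat) : Int) ∈ s
    · rw [if_pos (by rw [hkK]; exact hmemiff.mpr hmem)]
      constructor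
      · simp only [ih1, List.range_succ, List.map_append, List.map_cons, List.map_nil]
        simp [hmem]
      · simpa [hkK] using hKm1
    · rw [if_neg (by rw [hkK]; intro hc; exact hmem (hmemiff.mp hc))]
      constructor
      · simp only [ih1, List.range_succ, List.map_append, List.map_cons, List.map_nil]
        simp [hmem]
      · simpa [hkK] using hKm1

lemma rearrange2_alt_eq (arr : List Int) :
    rearrange2_alt arr
      = (List.range arr.length).map (fun (j : Nat) => if (j : Int) ∈ arr then (j : Int) else -1) := by
  unfold rearrange2_alt
  rw [(bfold (PySem.List.sorted (PySem.Set.ofList arr) (fun x => x) false)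
        (PySem.List.sorted_ofList_pairwise_lt arr) arr.length).1]
  apply map_range_congr
  intro j hj
  by_cases h : (j : Int) ∈ arr
  · simp [PySem.List.mem_sorted, PySem.Set.mem_ofList, h]
  · simp [PySem.List.mem_sorted, PySem.Set.mem_ofList, h]

-- ===== VERDICT (by name: the statement is the Claim_ definition above) =====
theorem rearrange2_spec : Claim_equal_rearrange2 := by
  intro arr _
  unfold Spec_rearrange2
  rw [rearrange2_eq, rearrange2_alt_eq]
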